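-- pv_equiv track=rewrite | github.com/natemago/adventofcode-2022 | day17-pyroclastic-flow/solution.py | get_last_pattern
-- ===== SOURCE A (Python) =====
-- def get_last_pattern(world, rows):
--     world = sorted(world, key=lambda p: p[1])
--     res = []
--     for x,y in world:
--         if y >= rows:
--             break
--         res.append((x,y))
--     return res
-- ===== SOURCE B (Python) =====
-- def get_last_pattern(world, rows):
--     kept = []
--     for x, y in world:
--         if y < rows:
--             kept.append((x, y))
--     return sorted(kept, key=lambda p: p[1])
-- ===== Notes on version B (the rewrite author's own statement) =====
-- stated objective: alternative
-- what changed: B filters the points with y < rows in one explicit pass first and then sorts the shorter kept list by y, instead of A's sort-everything-then-scan-with-break; stable sorting makes the two orders coincide.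
import Mathlib
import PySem

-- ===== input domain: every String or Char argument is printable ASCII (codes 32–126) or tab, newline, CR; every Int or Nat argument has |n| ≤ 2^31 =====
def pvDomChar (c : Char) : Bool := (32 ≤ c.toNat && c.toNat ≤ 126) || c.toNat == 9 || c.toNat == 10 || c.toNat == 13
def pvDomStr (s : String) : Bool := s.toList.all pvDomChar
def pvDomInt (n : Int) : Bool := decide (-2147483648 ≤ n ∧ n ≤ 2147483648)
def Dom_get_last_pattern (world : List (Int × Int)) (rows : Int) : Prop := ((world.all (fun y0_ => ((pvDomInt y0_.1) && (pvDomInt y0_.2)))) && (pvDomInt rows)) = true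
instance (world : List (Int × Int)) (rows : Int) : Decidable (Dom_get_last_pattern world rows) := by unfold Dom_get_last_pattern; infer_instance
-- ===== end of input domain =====

-- B filters points with y < rows in one pass and then sorts the kept list by y,
-- instead of A's sort-the-whole-list-then-scan-with-break; a stable sort makes the results equal.


-- ===== PORT A =====
-- the 'for x,y in world: if y >= rows: break; res.append((x,y))' loop, break included
def pvLoopA (rows : Int) (res : List (Int × Int)) : List (Int × Int) → List (Int × Int)
  | [] => res
  | (x, y) :: rest => if y ≥ rows then res else pvLoopA rows (res ++ [(x, y)]) rest

def get_last_pattern (world : List (Int × Int)) (rows : Int) : List (Int × Int) :=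
  pvLoopA rows [] (PySem.List.sorted world (fun p => p.2) false)

-- ===== PORT B =====
def get_last_pattern_alt (world : List (Int × Int)) (rows : Int) : List (Int × Int) :=
  let kept := world.foldl (fun acc p => if p.2 < rows then acc ++ [(p.1, p.2)] else acc) []
  PySem.List.sorted kept (fun p => p.2) false

-- ===== PRECONDITION & SPEC =====
def Spec_get_last_pattern (world : List (Int × Int)) (rows : Int) (out : List (Int × Int)) : Prop := out = get_last_pattern_alt world rows
instance (world : List (Int × Int)) (rows : Int) (out : List (Int × Int)) : Decidable (Spec_get_last_pattern world rows out) := by unfold Spec_get_last_pattern; infer_instance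

-- ===== CLAIM (what is proved, stated in full; the proofs are below) =====
def Claim_equal_get_last_pattern : Prop := ∀ (world : List (Int × Int)) (rows : Int), Dom_get_last_pattern world rows → Spec_get_last_pattern world rows (get_last_pattern world rows)

-- ===== LEMMAS AND PROOFS =====

-- A's loop with break is res ++ takeWhile (y < rows)
theorem pvLoopA_eq_takeWhile (rows : Int) (res : List (Int × Int)) (l : List (Int × Int)) :
    pvLoopA rows res l = res ++ l.takeWhile (fun p => decide (p.2 < rows)) := by
  induction l generalizing res with
  | nil => simp [pvLoopA]
  | cons h t ih =>
    obtain ⟨x, y⟩ := h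
    by_cases hy : y ≥ rows
    · simp [pvLoopA, hy, List.takeWhile, show ¬ y < rows by omega]
    · simp [pvLoopA, hy, ih, List.takeWhile, show y < rows by omega]

-- on a list pairwise-sorted by y, takeWhile (y < rows) is filter (y < rows)
theorem pv_takeWhile_eq_filter (rows : Int) (l : List (Int × Int))
    (hl : l.Pairwise (fun a b => a.2 ≤ b.2)) :
    l.takeWhile (fun p => decide (p.2 < rows)) = l.filter (fun p => decide (p.2 < rows)) := by
  induction l with
  | nil => rfl
  | cons h t ih =>
    rcases List.pairwise_cons.mp hl with ⟨hh, ht⟩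
    by_cases hp : h.2 < rows
    · simp [List.takeWhile, List.filter, hp, ih ht]
    · have hnone : t.filter (fun p => decide (p.2 < rows)) = [] :=
        List.filter_eq_nil_iff.mpr (fun p hpmem => by
          have := hh p hpmem; simp; omega)
      simp [List.takeWhile, List.filter, hp, hnone]

-- one-step unfoldings of the stable insertion
theorem pv_insertBy_cons_lt (x h : Int × Int) (t : List (Int × Int)) (hc : x.2 < h.2) :
    PySem.List.insertBy (fun a b => decide (a.2 < b.2)) x (h :: t) = x :: h :: t := by
  simp [PySem.List.insertBy, hc]

theorem pv_insertBy_cons_ge (x h : Int × Int) (t : List (Int × Int)) (hc : ¬ x.2 < h.2) :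
    PySem.List.insertBy (fun a b => decide (a.2 < b.2)) x (h :: t) =
      h :: PySem.List.insertBy (fun a b => decide (a.2 < b.2)) x t := by
  simp [PySem.List.insertBy, hc]

-- membership after insertion
theorem pv_mem_insertBy (x y : Int × Int) (l : List (Int × Int))
    (hy : y ∈ PySem.List.insertBy (fun a b => decide (a.2 < b.2)) x l) : y = x ∨ y ∈ l := by
  induction l with
  | nil => simp [PySem.List.insertBy] at hy; simp [hy]
  | cons h t ih =>
    by_cases hc : x.2 < h.2
    · rw [pv_insertBy_cons_lt x h t hc] at hy
      rcases List.mem_cons.mp hy with rfl | hy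
      · exact Or.inl rfl
      · exact Or.inr hy
    · rw [pv_insertBy_cons_ge x h t hc] at hy
      rcases List.mem_cons.mp hy with rfl | hy
      · exact Or.inr List.mem_cons_self
      · rcases ih hy with h1 | h1
        · exact Or.inl h1
        · exact Or.inr (List.mem_cons_of_mem _ h1)

-- insertBy (strictly-less test) preserves pairwise order by y
theorem pv_insertBy_pairwise (x : Int × Int) (l : List (Int × Int))
    (hl : l.Pairwise (fun a b => a.2 ≤ b.2)) :
    (PySem.List.insertBy (fun a b => decide (a.2 < b.2)) x l).Pairwise (fun a b => a.2 ≤ b.2) := by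
  induction l with
  | nil => simp [PySem.List.insertBy]
  | cons h t ih =>
    rcases List.pairwise_cons.mp hl with ⟨hh, ht⟩
    by_cases hc : x.2 < h.2
    · rw [pv_insertBy_cons_lt x h t hc]
      refine List.pairwise_cons.mpr ⟨fun b hb => ?_, hl⟩
      rcases List.mem_cons.mp hb with rfl | hb
      · omega
      · have := hh b hb; omega
    · rw [pv_insertBy_cons_ge x h t hc]
      refine List.pairwise_cons.mpr ⟨fun b hb => ?_, ih ht⟩
      rcases pv_mem_insertBy x b t hb with rfl | hb
      · omega
      · exact hh b hb

-- inserting x at the front when every key is strictly larger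
theorem pv_insertBy_front (x : Int × Int) (l : List (Int × Int))
    (h : ∀ y ∈ l, x.2 < y.2) :
    PySem.List.insertBy (fun a b => decide (a.2 < b.2)) x l = x :: l := by
  cases l with
  | nil => rfl
  | cons a t => exact pv_insertBy_cons_lt x a t (h a List.mem_cons_self)

-- filter commutes with a single stable insertion into a sorted list
theorem pv_filter_insertBy (pr : Int × Int → Bool) (x : Int × Int) (l : List (Int × Int))
    (hl : l.Pairwise (fun a b => a.2 ≤ b.2)) :
    (PySem.List.insertBy (fun a b => decide (a.2 < b.2)) x l).filter pr =
      if pr x then PySem.List.insertBy (fun a b => decide (a.2 < b.2)) x (l.filter pr)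
      else l.filter pr := by
  induction l with
  | nil => cases hx : pr x <;> simp [PySem.List.insertBy, List.filter, hx]
  | cons h t ih =>
    rcases List.pairwise_cons.mp hl with ⟨hh, ht⟩
    by_cases hc : x.2 < h.2
    · rw [pv_insertBy_cons_lt x h t hc]
      cases hx : pr x with
      | false => simp [List.filter, hx]
      | true =>
        cases hph : pr h with
        | true => simp [List.filter, hx, hph, pv_insertBy_cons_lt x h _ hc]
        | false =>
          have hfront : PySem.List.insertBy (fun a b => decide (a.2 < b.2)) x (t.filter pr) =
              x :: t.filter pr := by
            refine pv_insertBy_front x _ (fun y hy => ?_)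
            have := hh y (List.mem_of_mem_filter hy); omega
          simp [List.filter, hx, hph, hfront]
    · rw [pv_insertBy_cons_ge x h t hc]
      cases hph : pr h with
      | true =>
        simp only [List.filter, hph]
        rw [ih ht]
        cases hx : pr x <;> simp [pv_insertBy_cons_ge x h _ hc]
      | false =>
        simp only [List.filter, hph]
        rw [ih ht]

-- filter commutes with the whole insertion-sort fold
theorem pv_filter_foldl (pr : Int × Int → Bool) (xs acc : List (Int × Int))
    (hacc : acc.Pairwise (fun a b => a.2 ≤ b.2)) :
    (xs.foldl (fun a x => PySem.List.insertBy (fun a b => decide (a.2 < b.2)) x a) acc).filter pr =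
      (xs.filter pr).foldl (fun a x => PySem.List.insertBy (fun a b => decide (a.2 < b.2)) x a)
        (acc.filter pr) := by
  induction xs generalizing acc with
  | nil => simp
  | cons x t ih =>
    simp only [List.foldl_cons]
    rw [ih _ (pv_insertBy_pairwise x acc hacc), pv_filter_insertBy pr x acc hacc]
    cases hx : pr x <;> simp [List.filter, hx]

theorem pv_sorted_eq_foldl (xs : List (Int × Int)) :
    PySem.List.sorted xs (fun p => p.2) false =
      xs.foldl (fun a x => PySem.List.insertBy (fun a b => decide (a.2 < b.2)) x a) [] := by
  simp [PySem.List.sorted]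

-- filter commutes with the stable sort by y
theorem pv_filter_sorted (pr : Int × Int → Bool) (xs : List (Int × Int)) :
    (PySem.List.sorted xs (fun p => p.2) false).filter pr =
      PySem.List.sorted (xs.filter pr) (fun p => p.2) false := by
  rw [pv_sorted_eq_foldl, pv_sorted_eq_foldl, pv_filter_foldl pr xs [] List.Pairwise.nil]
  simp

-- ===== VERDICT (by name: the statement is the Claim_ definition above) =====
theorem get_last_pattern_spec : Claim_equal_get_last_pattern := by
  intro world rows _
  unfold Spec_get_last_pattern get_last_pattern get_last_pattern_alt
  rw [PySem.List.foldl_append_ite_eq_filter]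
  rw [pvLoopA_eq_takeWhile, List.nil_append,
    pv_takeWhile_eq_filter rows _ (PySem.List.sorted_pairwise world (fun p => p.2)),
    pv_filter_sorted]
  congr 1
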